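-- pv_equiv track=rewrite | github.com/graphql-python/graphql-core | src/graphql/language/block_string.py | get_block_string_indentation
-- ===== SOURCE A (Python) =====
-- def get_block_string_indentation(value: str) -> int:
--     """Get the amount of indentation for the given block string.
--
--     For internal use only.
--     """
--     is_first_line = is_empty_line = True
--     indent = 0
--     common_indent = None
--
--     for c in value:
--         if c in "\r\n":
--             is_first_line = False
--             is_empty_line = True
--             indent = 0
--         elif c in "\t ":
--             indent += 1
--         else:
--             if (
--                 is_empty_line
--                 and not is_first_line
--                 and (common_indent is None or indent < common_indent)
--             ):
--                 common_indent = indent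
--             is_empty_line = False
--
--     return common_indent or 0
-- ===== SOURCE B (Python) =====
-- def get_block_string_indentation(value: str) -> int:
--     """Line-based rewrite: split on CR/LF, take min leading-' \t' width of
--     non-blank lines after the first."""
--     common = None
--     for line in value.replace("\r", "\n").split("\n")[1:]:
--         stripped = line.lstrip(" \t")
--         if stripped:
--             indent = len(line) - len(stripped)
--             if common is None or indent < common:
--                 common = indent
--     return common or 0
-- ===== Notes on version B (the rewrite author's own statement) =====
-- stated objective: simpler
-- what changed: Replaced the character-by-character state machine (flags is_first_line/is_empty_line, running indent counter) by a line-based pass: split the string on CR/LF, lstrip ' ' from each line after the first, and take the minimum indentation of non-blank lines.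
import Mathlib
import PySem

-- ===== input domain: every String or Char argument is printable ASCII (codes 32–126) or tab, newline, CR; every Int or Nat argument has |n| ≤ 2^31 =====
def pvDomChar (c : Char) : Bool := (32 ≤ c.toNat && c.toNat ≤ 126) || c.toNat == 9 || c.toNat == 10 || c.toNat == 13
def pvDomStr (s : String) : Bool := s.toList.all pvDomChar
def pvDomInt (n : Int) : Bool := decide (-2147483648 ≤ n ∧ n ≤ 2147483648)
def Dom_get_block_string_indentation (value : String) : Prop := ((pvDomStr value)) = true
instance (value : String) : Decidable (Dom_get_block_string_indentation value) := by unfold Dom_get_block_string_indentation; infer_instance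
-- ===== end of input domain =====

-- B replaces A's char-by-char state machine by a line-based minimum; objective: simpler.

-- ===== PORT A =====
-- state = (is_first_line, is_empty_line, indent, common_indent)
def pvStepA (s : Bool × Bool × Int × Option Int) (c : Char) : Bool × Bool × Int × Option Int :=
  match s with
  | (isFirst, isEmpty, indent, ci) =>
    if c = '\r' ∨ c = '\n' then (false, true, 0, ci)
    else if c = '\t' ∨ c = ' ' then (isFirst, isEmpty, indent + 1, ci)
    else
      let ci' :=
        if isEmpty ∧ ¬ isFirst ∧ (ci = none ∨ ∃ m, ci = some m ∧ indent < m) then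
          some indent
        else ci
      (isFirst, false, indent, ci')

def get_block_string_indentation (value : String) : Int :=
  let fin := value.toList.foldl pvStepA (true, true, 0, none)
  -- `return common_indent or 0`
  match fin.2.2.2 with
  | none => 0
  | some v => if v = 0 then 0 else v

-- ===== PORT B =====
-- value.replace("\r", "\n") at list level (exact on all inputs)
def pvReplCR (cs : List Char) : List Char := cs.map (fun c => if c = '\r' then '\n' else c)

-- str.split("\n") at list level: returns (first line, remaining lines); exact on all inputs
def pvSplitNL : List Char → List Char × List (List Char)
  | [] => ([], [])
  | c :: rest =>
    let p := pvSplitNL rest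
    if c = '\n' then ([], p.1 :: p.2) else (c :: p.1, p.2)

-- len(line) - len(line.lstrip(" \t")) if the stripped line is non-empty
def pvLineIndent? (line : List Char) : Option Int :=
  let s := line.dropWhile (fun c => c = ' ' ∨ c = '\t')
  if s.isEmpty then none else some ((line.length : Int) - (s.length : Int))

def pvStepB (ci : Option Int) (line : List Char) : Option Int :=
  match pvLineIndent? line with
  | none => ci
  | some i =>
    match ci with
    | none => some i
    | some m => if i < m then some i else some m

def get_block_string_indentation_alt (value : String) : Int :=
  let lines := (pvSplitNL (pvReplCR value.toList)).2   -- lines[1:]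
  match lines.foldl pvStepB none with
  | none => 0
  | some v => if v = 0 then 0 else v

-- ===== PRECONDITION & SPEC =====
def Spec_get_block_string_indentation (value : String) (out : Int) : Prop := out = get_block_string_indentation_alt value
instance (value : String) (out : Int) : Decidable (Spec_get_block_string_indentation value out) := by unfold Spec_get_block_string_indentation; infer_instance

-- ===== CLAIM (what is proved, stated in full; the proofs are below) =====
def Claim_equal_get_block_string_indentation : Prop := ∀ (value : String), Dom_get_block_string_indentation value → Spec_get_block_string_indentation value (get_block_string_indentation value)

-- ===== LEMMAS AND PROOFS =====

-- what A's in-progress line state will contribute once the first non-ws char of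
-- the current line's remainder `l` is reached
def pvContrib (isFirst isEmpty : Bool) (indent : Int) (l : List Char) : Option Int :=
  if isFirst = true ∨ isEmpty = false then none
  else
    let s := l.dropWhile (fun c => c = ' ' ∨ c = '\t')
    if s.isEmpty then none else some (indent + ((l.length : Int) - (s.length : Int)))

def pvMerge (ci : Option Int) (x : Option Int) : Option Int :=
  match x with
  | none => ci
  | some i =>
    match ci with
    | none => some i
    | some m => if i < m then some i else some m

theorem pvStepB_eq (ci : Option Int) (l : List Char) :
    pvStepB ci l = pvMerge ci (pvLineIndent? l) := by
  simp [pvStepB, pvMerge]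

theorem pvContrib_line (l : List Char) :
    pvContrib false true 0 l = pvLineIndent? l := by
  simp [pvContrib, pvLineIndent?]

theorem pvMain (cs : List Char) :
    ∀ (isFirst isEmpty : Bool) (indent : Int) (ci : Option Int),
    (cs.foldl pvStepA (isFirst, isEmpty, indent, ci)).2.2.2 =
      (pvSplitNL (pvReplCR cs)).2.foldl pvStepB
        (pvMerge ci (pvContrib isFirst isEmpty indent (pvSplitNL (pvReplCR cs)).1)) := by
  induction cs with
  | nil =>
    intro isFirst isEmpty indent ci
    simp [pvSplitNL, pvReplCR, pvContrib, pvMerge]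
  | cons c rest ih =>
    intro isFirst isEmpty indent ci
    by_cases hnl : c = '\r' ∨ c = '\n'
    · have hrep : (if c = '\r' then '\n' else c) = '\n' := by
        rcases hnl with h | h <;> simp [h]
      simp only [pvReplCR, List.map_cons, hrep, pvSplitNL, List.foldl_cons]
      rw [show pvStepA (isFirst, isEmpty, indent, ci) c = (false, true, 0, ci) by
        simp [pvStepA, hnl]]
      rw [ih false true 0 ci]
      have : pvContrib isFirst isEmpty indent [] = none := by
        simp [pvContrib]
      simp only [pvReplCR] at *
      simp [pvContrib_line, pvStepB_eq, pvMerge, this]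
    · push Not at hnl
      obtain ⟨hr, hn⟩ := hnl
      have hrep : (if c = '\r' then '\n' else c) = c := by simp [hr]
      simp only [pvReplCR, List.map_cons, hrep, pvSplitNL, List.foldl_cons]
      simp only [if_neg hn]
      by_cases hws : c = '\t' ∨ c = ' '
      · rw [show pvStepA (isFirst, isEmpty, indent, ci) c = (isFirst, isEmpty, indent + 1, ci) by
          simp [pvStepA, hr, hn, hws]]
        rw [ih isFirst isEmpty (indent + 1) ci]
        simp only [pvReplCR]
        congr 1
        -- contributions agree: c is ' ' or '\t'
        have hdw : ∀ l : List Char,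
            (c :: l).dropWhile (fun x => x = ' ' ∨ x = '\t') =
            l.dropWhile (fun x => x = ' ' ∨ x = '\t') := by
          intro l
          rcases hws with h | h <;> simp [List.dropWhile, h]
        congr 1
        simp only [pvContrib, hdw]
        split
        · rfl
        · split
          · rfl
          · congr 1
            simp only [List.length_cons]
            push_cast
            omega
      · push Not at hws
        obtain ⟨ht, hs⟩ := hws
        rw [show pvStepA (isFirst, isEmpty, indent, ci) c =
            (isFirst, false, indent,
              if isEmpty ∧ ¬ isFirst ∧ (ci = none ∨ ∃ m, ci = some m ∧ indent < m)
              then some indent else ci) by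
          simp [pvStepA, hr, hn, ht, hs]]
        rw [ih isFirst false indent _]
        simp only [pvReplCR]
        congr 1
        have hcontribF : ∀ i : Int, pvContrib isFirst false i
            ((pvSplitNL (List.map (fun c => if c = '\r' then '\n' else c) rest)).1) = none := by
          intro i; simp [pvContrib]
        rw [hcontribF]
        have hdw : (c :: (pvSplitNL (List.map (fun c => if c = '\r' then '\n' else c) rest)).1).dropWhile
            (fun x => x = ' ' ∨ x = '\t') =
            c :: (pvSplitNL (List.map (fun c => if c = '\r' then '\n' else c) rest)).1 := by
          simp [List.dropWhile, hs, ht]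
        cases isFirst with
        | true =>
          simp [pvMerge, pvContrib]
        | false =>
          cases isEmpty with
          | false => simp [pvMerge, pvContrib]
          | true =>
            simp only [pvContrib, hdw]
            simp only [pvMerge]
            cases ci with
            | none => simp
            | some m =>
              simp only
              by_cases hlt : indent < m
              · simp [hlt]
              · simp [hlt]

-- ===== VERDICT (by name: the statement is the Claim_ definition above) =====
theorem get_block_string_indentation_spec : Claim_equal_get_block_string_indentation := by
  intro value _
  unfold Spec_get_block_string_indentation
  unfold get_block_string_indentation get_block_string_indentation_alt
  dsimp only
  rw [pvMain]
  have : pvContrib true true 0 (pvSplitNL (pvReplCR value.toList)).1 = none := by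
    simp [pvContrib]
  rw [this]
  rfl
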